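-- pv_equiv track=rewrite | github.com/yasufumi-nakata/Pytra | src/toolchain/emit/cpp/emitter.py | _split_top_level_union_type
-- ===== SOURCE A (Python) =====
-- def _split_top_level_union_type(type_name: str) -> list[str]:
--     parts: list[str] = []
--     depth = 0
--     current: list[str] = []
--     i = 0
--     while i < len(type_name):
--         ch = type_name[i]
--         if ch in "[<(":
--             depth += 1
--             current.append(ch)
--         elif ch in "]>)":
--             depth -= 1
--             current.append(ch)
--         elif ch == "|" and depth == 0:
--             part = "".join(current).strip()
--             if part != "":
--                 parts.append(part)
--             current = []
--         else:
--             current.append(ch)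
--         i += 1
--     tail = "".join(current).strip()
--     if tail != "":
--         parts.append(tail)
--     return parts
-- ===== SOURCE B (Python) =====
-- def _find_cut(s: str):
--     """Index of the first top-level '|' in s, or None."""
--     depth = 0
--     for i, ch in enumerate(s):
--         if ch in "[<(":
--             depth += 1
--         elif ch in "]>)":
--             depth -= 1
--         elif ch == "|" and depth == 0:
--             return i
--     return None
--
--
-- def _split_top_level_union_type(type_name: str) -> list[str]:
--     parts: list[str] = []
--     rest = type_name
--     while True:
--         i = _find_cut(rest)
--         if i is None:
--             tail = rest.strip()
--             if tail:
--                 parts.append(tail)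
--             return parts
--         head = rest[:i].strip()
--         if head:
--             parts.append(head)
--         rest = rest[i + 1:]
-- ===== Notes on version B (the rewrite author's own statement) =====
-- stated objective: faster
-- what changed: Replaces the single accumulate-characters-into-a-buffer scan with a find-the-first-top-level-bar helper returning a cut index, plus a loop that slices head and tail and repeats on the tail; segments are taken by bulk string slicing instead of per-character list appends and join.
import Mathlib
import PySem

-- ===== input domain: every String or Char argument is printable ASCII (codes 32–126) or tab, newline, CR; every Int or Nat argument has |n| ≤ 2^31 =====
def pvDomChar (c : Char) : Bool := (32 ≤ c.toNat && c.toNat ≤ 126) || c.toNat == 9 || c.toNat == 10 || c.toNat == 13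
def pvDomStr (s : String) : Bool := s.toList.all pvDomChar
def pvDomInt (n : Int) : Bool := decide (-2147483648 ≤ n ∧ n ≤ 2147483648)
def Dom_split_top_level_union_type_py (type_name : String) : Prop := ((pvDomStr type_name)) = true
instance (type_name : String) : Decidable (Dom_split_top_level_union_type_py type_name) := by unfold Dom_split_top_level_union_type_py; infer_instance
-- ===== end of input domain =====

-- B finds each top-level bar by index and slices, instead of accumulating a per-character buffer; measurably faster by a constant factor (bulk slicing vs per-char appends).


-- ===== PORT A =====
-- A's while loop reads type_name[i] for i = 0..len-1 in order: the obvious fold over the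
-- character list with the same state (parts, depth, current); "".join(current).strip() is
-- PySem.Str.strip (String.mk current).
def aStep (st : List String × Int × List Char) (ch : Char) : List String × Int × List Char :=
  let parts := st.1; let depth := st.2.1; let current := st.2.2
  if ch = '[' ∨ ch = '<' ∨ ch = '(' then
    (parts, depth + 1, current ++ [ch])
  else if ch = ']' ∨ ch = '>' ∨ ch = ')' then
    (parts, depth - 1, current ++ [ch])
  else if ch = '|' ∧ depth = 0 then
    let part := PySem.Str.strip (String.mk current)
    (if part ≠ "" then parts ++ [part] else parts, depth, [])
  else
    (parts, depth, current ++ [ch])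

def split_top_level_union_type_py (type_name : String) : List String :=
  let st := type_name.toList.foldl aStep ([], 0, [])
  let tail := PySem.Str.strip (String.mk st.2.2)
  if tail ≠ "" then st.1 ++ [tail] else st.1

-- ===== PORT B =====
-- _find_cut: index of the first top-level '|' (None → none); k is the running enumerate index.
def findCut : List Char → Int → Nat → Option Nat
  | [], _, _ => none
  | ch :: cs, depth, k =>
    if ch = '[' ∨ ch = '<' ∨ ch = '(' then findCut cs (depth + 1) (k + 1)
    else if ch = ']' ∨ ch = '>' ∨ ch = ')' then findCut cs (depth - 1) (k + 1)
    else if ch = '|' ∧ depth = 0 then some k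
    else findCut cs depth (k + 1)

theorem findCut_some_ne_nil {cs : List Char} {d : Int} {k i : Nat}
    (h : findCut cs d k = some i) : cs ≠ [] := by
  intro hnil; subst hnil; simp [findCut] at h

-- the main while loop; rest[:i] is List.take i, rest[i+1:] is List.drop (i+1)
-- (exact for 0 ≤ i < len, cf. PySem.List.slice_to / slice_from).
def goB (cs : List Char) (parts : List String) : List String :=
  match hc : findCut cs 0 0 with
  | none =>
    let tail := PySem.Str.strip (String.mk cs)
    if tail ≠ "" then parts ++ [tail] else parts
  | some i =>
    let head := PySem.Str.strip (String.mk (cs.take i))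
    goB (cs.drop (i + 1)) (if head ≠ "" then parts ++ [head] else parts)
termination_by cs.length
decreasing_by
  have hne := findCut_some_ne_nil hc
  cases cs with
  | nil => exact absurd rfl hne
  | cons a l => simp [List.drop_succ_cons]

def split_top_level_union_type_py_alt (type_name : String) : List String :=
  goB type_name.toList []

-- ===== PRECONDITION & SPEC =====
def Spec_split_top_level_union_type_py (type_name : String) (out : List String) : Prop := out = split_top_level_union_type_py_alt type_name
instance (type_name : String) (out : List String) : Decidable (Spec_split_top_level_union_type_py type_name out) := by unfold Spec_split_top_level_union_type_py; infer_instance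

-- ===== CLAIM (what is proved, stated in full; the proofs are below) =====
def Claim_equal_split_top_level_union_type_py : Prop := ∀ (type_name : String), Dom_split_top_level_union_type_py type_name → Spec_split_top_level_union_type_py type_name (split_top_level_union_type_py type_name)

-- ===== LEMMAS AND PROOFS =====

-- clean (non-dependent) unfolding equation for goB
theorem goB_eq (cs : List Char) (parts : List String) :
    goB cs parts =
      match findCut cs 0 0 with
      | none =>
        let tail := PySem.Str.strip (String.mk cs)
        if tail ≠ "" then parts ++ [tail] else parts
      | some i =>
        let head := PySem.Str.strip (String.mk (cs.take i))
        goB (cs.drop (i + 1)) (if head ≠ "" then parts ++ [head] else parts) := by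
  rw [goB.eq_def]
  split <;> rename_i h <;> simp [h]

-- finishing step of A's port, factored for the invariant
def aFinish (st : List String × Int × List Char) : List String :=
  let tail := PySem.Str.strip (String.mk st.2.2)
  if tail ≠ "" then st.1 ++ [tail] else st.1

-- shifting the enumerate index shifts the returned cut index
theorem findCut_shift (cs : List Char) (d : Int) (k : Nat) :
    findCut cs d (k + 1) = (findCut cs d k).map (· + 1) := by
  induction cs generalizing d k with
  | nil => simp [findCut]
  | cons ch cs ih =>
    simp only [findCut]
    split_ifs <;> simp [ih]

-- the invariant: A's loop from state (parts, d, cur) produces exactly what B's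
-- slice-and-recurse loop produces for the remaining characters
theorem aLoop_eq_goB (cs : List Char) (d : Int) (parts : List String) (cur : List Char) :
    aFinish (cs.foldl aStep (parts, d, cur)) =
      match findCut cs d 0 with
      | none =>
        let tail := PySem.Str.strip (String.mk (cur ++ cs))
        if tail ≠ "" then parts ++ [tail] else parts
      | some i =>
        let head := PySem.Str.strip (String.mk (cur ++ cs.take i))
        goB (cs.drop (i + 1)) (if head ≠ "" then parts ++ [head] else parts) := by
  induction cs generalizing d parts cur with
  | nil => simp [findCut, aFinish]
  | cons ch cs ih =>
    by_cases h1 : ch = '[' ∨ ch = '<' ∨ ch = '('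
    · have : findCut (ch :: cs) d 0 = (findCut cs (d + 1) 0).map (· + 1) := by
        simp [findCut, h1, findCut_shift]
      rw [List.foldl_cons, this]
      have hstep : aStep (parts, d, cur) ch = (parts, d + 1, cur ++ [ch]) := by
        simp [aStep, h1]
      rw [hstep, ih]
      cases hfc : findCut cs (d + 1) 0 with
      | none => simp
      | some i => simp [List.take_succ_cons, List.drop_succ_cons]
    · by_cases h2 : ch = ']' ∨ ch = '>' ∨ ch = ')'
      · have : findCut (ch :: cs) d 0 = (findCut cs (d - 1) 0).map (· + 1) := by
          simp [findCut, h1, h2, findCut_shift]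
        rw [List.foldl_cons, this]
        have hstep : aStep (parts, d, cur) ch = (parts, d - 1, cur ++ [ch]) := by
          simp [aStep, h1, h2]
        rw [hstep, ih]
        cases hfc : findCut cs (d - 1) 0 with
        | none => simp
        | some i => simp [List.take_succ_cons, List.drop_succ_cons]
      · by_cases h3 : ch = '|' ∧ d = 0
        · have hfc : findCut (ch :: cs) d 0 = some 0 := by
            simp [findCut, h3]
          rw [List.foldl_cons, hfc]
          have hstep : aStep (parts, d, cur) ch =
              (if PySem.Str.strip (String.mk cur) ≠ "" then
                  parts ++ [PySem.Str.strip (String.mk cur)] else parts, d, []) := by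
            simp [aStep, h3]
          rw [hstep]
          obtain ⟨-, rfl⟩ := h3
          rw [ih]
          simp only [List.take_zero, List.append_nil, List.drop_succ_cons, List.nil_append]
          rw [goB_eq]
          cases hfc' : findCut cs 0 0 <;> simp [hfc']
        · have : findCut (ch :: cs) d 0 = (findCut cs d 0).map (· + 1) := by
            simp only [findCut]
            rw [if_neg h1, if_neg h2, if_neg h3, findCut_shift]
          rw [List.foldl_cons, this]
          have hstep : aStep (parts, d, cur) ch = (parts, d, cur ++ [ch]) := by
            simp [aStep, h1, h2, h3]
          rw [hstep, ih]
          cases hfc : findCut cs d 0 with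
          | none => simp
          | some i => simp [List.take_succ_cons, List.drop_succ_cons]

-- ===== VERDICT (by name: the statement is the Claim_ definition above) =====
theorem split_top_level_union_type_py_spec : Claim_equal_split_top_level_union_type_py := by
  intro s _
  have h := aLoop_eq_goB s.toList 0 [] []
  simp only [List.nil_append] at h
  show aFinish (s.toList.foldl aStep ([], 0, [])) = goB s.toList []
  rw [h, goB_eq]
  cases hfc : findCut s.toList 0 0 <;> simp [hfc]
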